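-- pv_equiv track=rewrite | github.com/o9nn/elizaos-cpp | ts_to_cpp_transpiler.py | add_conditional_includes
-- ===== SOURCE A (Python) =====
-- from typing import List, Dict, Tuple, Optional
--
-- def add_conditional_includes(includes: List[str], content: str) -> List[str]:
--     """Add includes based on content analysis"""
--     includes_set = set(includes)
--
--     # Check for std::any usage
--     if 'std::any' in content:
--         includes_set.add('#include <any>')
--
--     # Check for std::variant usage
--     if 'std::variant' in content:
--         includes_set.add('#include <variant>')
--
--     # Check for std::future usage
--     if 'std::future' in content:
--         includes_set.add('#include <future>')
--
--     # Check for std::tuple usage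
--     if 'std::tuple' in content:
--         includes_set.add('#include <tuple>')
--
--     # Sort includes properly: pragma once first, then system, then project
--     result = []
--     if '#pragma once' in includes_set:
--         result.append('#pragma once')
--         includes_set.remove('#pragma once')
--
--     # Add system includes (starts with <)
--     system_includes = sorted([i for i in includes_set if i.startswith('#include <')])
--     result.extend(system_includes)
--
--     # Add project includes (starts with #include ")
--     project_includes = sorted([i for i in includes_set if i.startswith('#include "')])
--     result.extend(project_includes)
--
--     return result
-- ===== SOURCE B (Python) =====
-- def add_conditional_includes(includes, content):
--     """Add includes based on content analysis"""
--     needed = set(includes)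
--     for needle, header in [('std::any', '#include <any>'),
--                            ('std::variant', '#include <variant>'),
--                            ('std::future', '#include <future>'),
--                            ('std::tuple', '#include <tuple>')]:
--         if needle in content:
--             needed.add(header)
--
--     def key(inc):
--         if inc == '#pragma once':
--             rank = 0
--         elif inc.startswith('#include <'):
--             rank = 1
--         else:
--             rank = 2
--         return (rank, inc)
--
--     # Build the result incrementally: each kept include is inserted at its
--     # ordered position (insertion sort); unrecognised lines are dropped.
--     result = []
--     for inc in needed:
--         if inc != '#pragma once' and not inc.startswith('#include <') \
--                 and not inc.startswith('#include "'):
--             continue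
--         j = 0
--         while j < len(result) and key(result[j]) < key(inc):
--             j += 1
--         result.insert(j, inc)
--     return result
-- ===== Notes on version B (the rewrite author's own statement) =====
-- stated objective: alternative
-- what changed: A's pragma special-case plus two separately filtered-and-sorted sublists concatenated are replaced by a single incremental pass that ordered-inserts each kept include into the growing result (an insertion sort under a (category-rank, string) key), with no library sort and no partitioning.
import Mathlib
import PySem

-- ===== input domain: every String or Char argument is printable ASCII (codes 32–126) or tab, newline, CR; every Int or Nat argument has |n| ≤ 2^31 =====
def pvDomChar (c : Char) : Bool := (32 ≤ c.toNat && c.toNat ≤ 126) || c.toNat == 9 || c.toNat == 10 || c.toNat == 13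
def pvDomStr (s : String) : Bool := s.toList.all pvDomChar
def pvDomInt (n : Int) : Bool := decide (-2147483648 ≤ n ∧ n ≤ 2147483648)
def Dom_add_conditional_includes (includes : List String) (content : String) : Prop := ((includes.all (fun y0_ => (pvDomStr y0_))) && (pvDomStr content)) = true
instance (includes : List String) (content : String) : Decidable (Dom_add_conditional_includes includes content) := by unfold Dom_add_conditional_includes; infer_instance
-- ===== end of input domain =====

-- B replaces A's pragma-special-case plus two separately filtered-and-sorted sublists by a single
-- incremental pass that ordered-inserts each kept include into the growing result (insertion sort
-- under a (category-rank, string) key); same return value, no library sort and no partitioning.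

-- ===== PORT A =====
def add_conditional_includes (includes : List String) (content : String) : List String :=
  let includes_set0 : PySem.Set String := PySem.Set.ofList includes
  let includes_set1 := if PySem.Str.isIn "std::any" content then includes_set0.add "#include <any>" else includes_set0
  let includes_set2 := if PySem.Str.isIn "std::variant" content then includes_set1.add "#include <variant>" else includes_set1
  let includes_set3 := if PySem.Str.isIn "std::future" content then includes_set2.add "#include <future>" else includes_set2
  let includes_set4 := if PySem.Str.isIn "std::tuple" content then includes_set3.add "#include <tuple>" else includes_set3
  let pragmaStep :=
    if PySem.Set.contains includes_set4 "#pragma once"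
    then (["#pragma once"], includes_set4.discard "#pragma once")
    else (([] : List String), includes_set4)
  let result := pragmaStep.1
  let includes_set5 := pragmaStep.2
  let system_includes := PySem.List.sorted (includes_set5.filter (fun i => PySem.Str.startswith i "#include <")) (fun i => i)
  let project_includes := PySem.List.sorted (includes_set5.filter (fun i => PySem.Str.startswith i "#include \"")) (fun i => i)
  result ++ system_includes ++ project_includes

-- ===== PORT B =====
def pvKey (i : String) : Lex (Int × String) :=
  toLex
    ((if i == "#pragma once" then (0 : Int)
      else if PySem.Str.startswith i "#include <" then 1
      else 2), i)

-- the while-loop + list.insert of Source B: walk past smaller keys, then place the element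
def pvInsert (result : List String) (inc : String) : List String :=
  match result with
  | [] => [inc]
  | h :: t => if pvKey h < pvKey inc then h :: pvInsert t inc else inc :: h :: t

def add_conditional_includes_alt (includes : List String) (content : String) : List String :=
  let needed : PySem.Set String :=
    [("std::any", "#include <any>"), ("std::variant", "#include <variant>"),
     ("std::future", "#include <future>"), ("std::tuple", "#include <tuple>")].foldl
      (fun s p => if PySem.Str.isIn p.1 content then s.add p.2 else s)
      (PySem.Set.ofList includes)
  needed.foldl
    (fun result inc =>
      if inc ≠ "#pragma once" && !(PySem.Str.startswith inc "#include <")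
          && !(PySem.Str.startswith inc "#include \"")
      then result
      else pvInsert result inc)
    []

-- ===== PRECONDITION & SPEC =====
def Spec_add_conditional_includes (includes : List String) (content : String) (out : List String) : Prop := out = add_conditional_includes_alt includes content
instance (includes : List String) (content : String) (out : List String) : Decidable (Spec_add_conditional_includes includes content out) := by unfold Spec_add_conditional_includes; infer_instance

-- ===== CLAIM (what is proved, stated in full; the proofs are below) =====
def Claim_equal_add_conditional_includes : Prop := ∀ (includes : List String) (content : String), Dom_add_conditional_includes includes content → Spec_add_conditional_includes includes content (add_conditional_includes includes content)

-- ===== LEMMAS AND PROOFS =====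

def pvKeep (i : String) : Bool :=
  i == "#pragma once" || PySem.Str.startswith i "#include <" || PySem.Str.startswith i "#include \""

-- the set both programs build from `includes` and `content` (proof-only abbreviation)
def pvS4 (includes : List String) (content : String) : List String :=
  let s0 : PySem.Set String := PySem.Set.ofList includes
  let s1 := if PySem.Str.isIn "std::any" content then s0.add "#include <any>" else s0
  let s2 := if PySem.Str.isIn "std::variant" content then s1.add "#include <variant>" else s1
  let s3 := if PySem.Str.isIn "std::future" content then s2.add "#include <future>" else s2
  if PySem.Str.isIn "std::tuple" content then s3.add "#include <tuple>" else s3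

lemma pvS4_nodup (includes : List String) (content : String) : (pvS4 includes content).Nodup := by
  unfold pvS4
  split_ifs <;>
    first
      | exact PySem.Set.nodup_ofList includes
      | (repeat' apply PySem.Set.nodup_add)
  all_goals exact PySem.Set.nodup_ofList includes

-- mutual exclusivity of the three categories
lemma pvSys_ne_pragma {s : String} (h : PySem.Str.startswith s "#include <" = true) :
    s ≠ "#pragma once" := by
  rintro rfl; exact absurd h (by decide)

lemma pvProj_ne_pragma {s : String} (h : PySem.Str.startswith s "#include \"" = true) :
    s ≠ "#pragma once" := by
  rintro rfl; exact absurd h (by decide)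

lemma pvSys_proj_exclusive {s : String} (h1 : PySem.Str.startswith s "#include <" = true)
    (h2 : PySem.Str.startswith s "#include \"" = true) : False := by
  rw [PySem.Str.startswith_eq, PySem.Chars.startswith_iff] at h1 h2
  have hp := List.prefix_of_prefix_length_le h1 h2 (by decide)
  have := hp.eq_of_length (by decide)
  exact absurd this (by decide)

-- rank of a string, the first component of pvKey
def pvRank (i : String) : Int :=
  if i == "#pragma once" then 0
  else if PySem.Str.startswith i "#include <" then 1
  else 2

lemma pvKey_eq (i : String) : pvKey i = toLex (pvRank i, i) := by
  unfold pvKey pvRank; rfl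

lemma pvRank_sys {s : String} (h : PySem.Str.startswith s "#include <" = true) : pvRank s = 1 := by
  have hne := pvSys_ne_pragma h
  unfold pvRank
  rw [if_neg (by simp [hne]), if_pos h]

lemma pvRank_proj {s : String} (h : PySem.Str.startswith s "#include \"" = true) : pvRank s = 2 := by
  have hne := pvProj_ne_pragma h
  unfold pvRank
  rw [if_neg (by simp [hne]), if_neg]
  intro h1
  exact pvSys_proj_exclusive h1 h

lemma pvKey_lt_of_rank_lt {a b : String} (h : pvRank a < pvRank b) : pvKey a < pvKey b := by
  rw [pvKey_eq, pvKey_eq, Prod.Lex.lt_iff]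
  exact Or.inl h

lemma pvKey_lt_of_rank_eq {a b : String} (hr : pvRank a = pvRank b) (h : a < b) :
    pvKey a < pvKey b := by
  rw [pvKey_eq, pvKey_eq, Prod.Lex.lt_iff]
  exact Or.inr ⟨hr, h⟩

lemma pvKey_inj {a b : String} (h : pvKey a = pvKey b) : a = b := by
  rw [pvKey_eq, pvKey_eq] at h
  exact congrArg Prod.snd (toLex.injective h)

-- ===== insertion-sort correctness for B =====

lemma pvInsert_perm (l : List String) (x : String) : (pvInsert l x).Perm (x :: l) := by
  induction l with
  | nil => simp [pvInsert]
  | cons h t ih =>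
      unfold pvInsert
      split_ifs
      · exact ((ih.cons h).trans (List.Perm.swap x h t))
      · exact List.Perm.refl _

lemma pvInsert_mem {l : List String} {x y : String} (hy : y ∈ pvInsert l x) :
    y = x ∨ y ∈ l := by
  have := (pvInsert_perm l x).mem_iff.mp hy
  simpa using this

lemma pvInsert_pairwise {l : List String} {x : String}
    (hp : l.Pairwise (fun a b => pvKey a < pvKey b)) (hx : x ∉ l) :
    (pvInsert l x).Pairwise (fun a b => pvKey a < pvKey b) := by
  induction l with
  | nil => simp [pvInsert]
  | cons h t ih =>
      rw [List.pairwise_cons] at hp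
      unfold pvInsert
      split_ifs with hlt
      · rw [List.pairwise_cons]
        refine ⟨?_, ih hp.2 (fun hm => hx (List.mem_cons_of_mem _ hm))⟩
        intro y hy
        rcases pvInsert_mem hy with rfl | hy
        · exact hlt
        · exact hp.1 y hy
      · rw [List.pairwise_cons]
        refine ⟨?_, List.pairwise_cons.mpr hp⟩
        intro y hy
        rcases List.mem_cons.mp hy with rfl | hy
        · -- key x < key h since ¬(key h < key x) and x ≠ h
          have hne : pvKey x ≠ pvKey y := fun he => hx (by simp [pvKey_inj he])
          exact lt_of_le_of_ne (le_of_not_gt hlt) hne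
        · exact lt_trans
            (lt_of_le_of_ne (le_of_not_gt hlt)
              (fun he => hx (by simp [pvKey_inj he])))
            (hp.1 y hy)

-- the port's skip-condition is the negation of pvKeep
lemma pvSkip_iff (x : String) :
    (x ≠ "#pragma once" && !(PySem.Str.startswith x "#include <")
      && !(PySem.Str.startswith x "#include \"")) = !pvKeep x := by
  unfold pvKeep
  by_cases h1 : x = "#pragma once"
  · simp [h1]
  · have hb : (x == "#pragma once") = false := beq_eq_false_iff_ne.mpr h1
    simp [h1, hb, Bool.not_or]

-- B's fold: pairwise strictly key-increasing, and a permutation of acc ++ (kept part of l)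
lemma pvFoldB (l : List String) (acc : List String)
    (hnd : (acc ++ l).Nodup)
    (hp : acc.Pairwise (fun a b => pvKey a < pvKey b)) :
    (l.foldl
      (fun result inc =>
        if inc ≠ "#pragma once" && !(PySem.Str.startswith inc "#include <")
            && !(PySem.Str.startswith inc "#include \"")
        then result
        else pvInsert result inc) acc).Pairwise (fun a b => pvKey a < pvKey b) ∧
    (l.foldl
      (fun result inc =>
        if inc ≠ "#pragma once" && !(PySem.Str.startswith inc "#include <")
            && !(PySem.Str.startswith inc "#include \"")
        then result
        else pvInsert result inc) acc).Perm (acc ++ l.filter pvKeep) := by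
  induction l generalizing acc with
  | nil =>
      simp only [List.foldl_nil, List.filter_nil, List.append_nil]
      exact ⟨hp, List.Perm.refl _⟩
  | cons x t ih =>
      have hxacc : x ∉ acc := fun hm =>
        List.disjoint_of_nodup_append hnd hm List.mem_cons_self
      rw [List.foldl_cons, pvSkip_iff]
      cases hkeep : pvKeep x with
      | false =>
          simp only [Bool.not_false, if_true] at *
          have hnd2 : (acc ++ t).Nodup :=
            hnd.sublist (((List.sublist_cons_self x t).append_left acc))
          obtain ⟨h1, h2⟩ := ih acc hnd2 hp
          refine ⟨h1, h2.trans ?_⟩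
          simp [hkeep]
      | true =>
          simp only [Bool.not_true, Bool.false_eq_true, if_false] at *
          have hperm : (pvInsert acc x).Perm (x :: acc) := pvInsert_perm acc x
          have hpm : (pvInsert acc x ++ t).Perm (acc ++ x :: t) :=
            (hperm.append_right t).trans List.perm_middle.symm
          have hnd2 : (pvInsert acc x ++ t).Nodup := hpm.nodup_iff.mpr hnd
          obtain ⟨h1, h2⟩ := ih (pvInsert acc x) hnd2 (pvInsert_pairwise hp hxacc)
          refine ⟨h1, h2.trans ?_⟩
          have hfil : (x :: t).filter pvKeep = x :: t.filter pvKeep := by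
            simp [hkeep]
          rw [hfil]
          exact (hperm.append_right _).trans List.perm_middle.symm

-- the heart of the A side: pragma-part ++ sorted system ++ sorted project = one composite-key sort
lemma pvCore (S S' : List String) (hnd : S.Nodup) (hnd' : S'.Nodup)
    (pre : List String) (hpre : pre = if "#pragma once" ∈ S then ["#pragma once"] else [])
    (hmem : ∀ x, x ∈ S' ↔ x ∈ S ∧ x ≠ "#pragma once") :
    PySem.List.sorted (S.filter pvKeep) pvKey =
      pre ++ PySem.List.sorted (S'.filter (fun i => PySem.Str.startswith i "#include <")) (fun i => i)
          ++ PySem.List.sorted (S'.filter (fun i => PySem.Str.startswith i "#include \"")) (fun i => i) := by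
  set A1 := PySem.List.sorted (S'.filter (fun i => PySem.Str.startswith i "#include <")) (fun i => i) with hA1def
  set A2 := PySem.List.sorted (S'.filter (fun i => PySem.Str.startswith i "#include \"")) (fun i => i) with hA2def
  have hA1mem : ∀ x, x ∈ A1 ↔ (x ∈ S ∧ x ≠ "#pragma once") ∧ PySem.Str.startswith x "#include <" = true := by
    intro x
    rw [hA1def, PySem.List.mem_sorted, List.mem_filter, hmem]
  have hA2mem : ∀ x, x ∈ A2 ↔ (x ∈ S ∧ x ≠ "#pragma once") ∧ PySem.Str.startswith x "#include \"" = true := by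
    intro x
    rw [hA2def, PySem.List.mem_sorted, List.mem_filter, hmem]
  have hA1nd : A1.Nodup := ((PySem.List.sorted_perm _ _ _).nodup_iff).mpr (hnd'.filter _)
  have hA2nd : A2.Nodup := ((PySem.List.sorted_perm _ _ _).nodup_iff).mpr (hnd'.filter _)
  have hprag_notA1 : "#pragma once" ∉ A1 := by
    intro h; exact pvSys_ne_pragma (hA1mem _ |>.mp h).2 rfl
  have hprag_notA2 : "#pragma once" ∉ A2 := by
    intro h; exact pvProj_ne_pragma (hA2mem _ |>.mp h).2 rfl
  have hdisj : ∀ x, x ∈ A1 → x ∈ A2 → False := by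
    intro x h1 h2
    exact pvSys_proj_exclusive (hA1mem _ |>.mp h1).2 (hA2mem _ |>.mp h2).2
  have hpre_mem : ∀ x, x ∈ pre → x = "#pragma once" ∧ "#pragma once" ∈ S := by
    intro x hx
    rw [hpre] at hx
    split_ifs at hx with hp
    · rw [List.mem_singleton] at hx; exact ⟨hx, hp⟩
    · simp at hx
  have hpre_nd : pre.Nodup := by rw [hpre]; split_ifs <;> simp
  apply PySem.List.sorted_eq_of_perm_of_pairwise_lt
  · -- permutation
    rw [List.perm_ext_iff_of_nodup]
    · intro x
      have hxsys := @pvSys_ne_pragma x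
      have hxproj := @pvProj_ne_pragma x
      rw [List.mem_append, List.mem_append, hA1mem, hA2mem, List.mem_filter]
      unfold pvKeep
      simp only [Bool.or_eq_true, beq_iff_eq]
      by_cases hp : "#pragma once" ∈ S
      · rw [hpre, if_pos hp]
        simp only [List.mem_singleton]
        constructor
        · rintro ((rfl | ⟨⟨hxS, _⟩, hx⟩) | ⟨⟨hxS, _⟩, hx⟩)
          · exact ⟨hp, Or.inl (Or.inl rfl)⟩
          · exact ⟨hxS, Or.inl (Or.inr hx)⟩
          · exact ⟨hxS, Or.inr hx⟩
        · rintro ⟨hxS, ((rfl | hx) | hx)⟩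
          · exact Or.inl (Or.inl rfl)
          · exact Or.inl (Or.inr ⟨⟨hxS, hxsys hx⟩, hx⟩)
          · exact Or.inr ⟨⟨hxS, hxproj hx⟩, hx⟩
      · rw [hpre, if_neg hp]
        simp only [List.not_mem_nil, false_or]
        constructor
        · rintro (⟨⟨hxS, _⟩, hx⟩ | ⟨⟨hxS, _⟩, hx⟩)
          · exact ⟨hxS, Or.inl (Or.inr hx)⟩
          · exact ⟨hxS, Or.inr hx⟩
        · rintro ⟨hxS, ((rfl | hx) | hx)⟩
          · exact absurd hxS hp
          · exact Or.inl ⟨⟨hxS, hxsys hx⟩, hx⟩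
          · exact Or.inr ⟨⟨hxS, hxproj hx⟩, hx⟩
    · -- Nodup of (pre ++ A1) ++ A2
      rw [List.nodup_append, List.nodup_append]
      refine ⟨⟨hpre_nd, hA1nd, ?_⟩, hA2nd, ?_⟩
      · intro a ha b hb
        obtain ⟨rfl, -⟩ := hpre_mem a ha
        rintro rfl
        exact hprag_notA1 hb
      · intro a ha b hb
        rcases List.mem_append.mp ha with hpr | h1
        · obtain ⟨rfl, -⟩ := hpre_mem a hpr
          rintro rfl
          exact hprag_notA2 hb
        · rintro rfl
          exact hdisj a h1 hb
    · exact hnd.filter _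
  · -- pairwise strict key increase on (pre ++ A1) ++ A2
    rw [List.pairwise_append, List.pairwise_append]
    have hpwA1 : A1.Pairwise (fun a b => pvKey a < pvKey b) := by
      have hle : A1.Pairwise (fun a b : String => a ≤ b) := PySem.List.sorted_pairwise _ _
      refine (hle.and hA1nd).imp_of_mem ?_
      intro a b ha hb h
      exact pvKey_lt_of_rank_eq
        (by rw [pvRank_sys (hA1mem _ |>.mp ha).2, pvRank_sys (hA1mem _ |>.mp hb).2])
        (lt_of_le_of_ne h.1 h.2)
    have hpwA2 : A2.Pairwise (fun a b => pvKey a < pvKey b) := by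
      have hle : A2.Pairwise (fun a b : String => a ≤ b) := PySem.List.sorted_pairwise _ _
      refine (hle.and hA2nd).imp_of_mem ?_
      intro a b ha hb h
      exact pvKey_lt_of_rank_eq
        (by rw [pvRank_proj (hA2mem _ |>.mp ha).2, pvRank_proj (hA2mem _ |>.mp hb).2])
        (lt_of_le_of_ne h.1 h.2)
    have hpwpre : pre.Pairwise (fun a b => pvKey a < pvKey b) := by
      rw [hpre]; split_ifs <;> simp
    refine ⟨⟨hpwpre, hpwA1, ?_⟩, hpwA2, ?_⟩
    · intro a ha b hb
      obtain ⟨rfl, -⟩ := hpre_mem a ha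
      apply pvKey_lt_of_rank_lt
      rw [pvRank_sys (hA1mem _ |>.mp hb).2]
      decide
    · intro a ha b hb
      have hrb : pvRank b = 2 := pvRank_proj (hA2mem _ |>.mp hb).2
      rcases List.mem_append.mp ha with hpr | h1
      · obtain ⟨rfl, -⟩ := hpre_mem a hpr
        apply pvKey_lt_of_rank_lt
        rw [hrb]; decide
      · apply pvKey_lt_of_rank_lt
        rw [pvRank_sys (hA1mem _ |>.mp h1).2, hrb]; decide

lemma pvA_eq (includes : List String) (content : String) :
    add_conditional_includes includes content =
      (if PySem.Set.contains (pvS4 includes content) "#pragma once"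
       then (["#pragma once"], PySem.Set.discard (pvS4 includes content) "#pragma once")
       else (([] : List String), pvS4 includes content)).1 ++
      PySem.List.sorted
        ((if PySem.Set.contains (pvS4 includes content) "#pragma once"
          then (["#pragma once"], PySem.Set.discard (pvS4 includes content) "#pragma once")
          else (([] : List String), pvS4 includes content)).2.filter
          (fun i => PySem.Str.startswith i "#include <")) (fun i => i) ++
      PySem.List.sorted
        ((if PySem.Set.contains (pvS4 includes content) "#pragma once"
          then (["#pragma once"], PySem.Set.discard (pvS4 includes content) "#pragma once")
          else (([] : List String), pvS4 includes content)).2.filter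
          (fun i => PySem.Str.startswith i "#include \"")) (fun i => i) := by
  rw [add_conditional_includes, pvS4]

lemma pvA_sorted (includes : List String) (content : String) :
    add_conditional_includes includes content =
      PySem.List.sorted ((pvS4 includes content).filter pvKeep) pvKey := by
  rw [pvA_eq]
  set S := pvS4 includes content with hS
  have hnd : S.Nodup := pvS4_nodup includes content
  by_cases hp : PySem.Set.contains S "#pragma once"
  · rw [if_pos hp]
    have hpmem : "#pragma once" ∈ S := (PySem.Set.contains_iff S _).mp hp
    exact (pvCore S (PySem.Set.discard S "#pragma once") hnd (PySem.Set.nodup_discard S _ hnd)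
      ["#pragma once"] (by rw [if_pos hpmem]) (fun x => PySem.Set.mem_discard S _ x)).symm
  · rw [if_neg hp]
    have hpmem : "#pragma once" ∉ S := fun h => hp ((PySem.Set.contains_iff S _).mpr h)
    exact (pvCore S S hnd hnd [] (by rw [if_neg hpmem])
      (fun x => ⟨fun h => ⟨h, fun he => hpmem (he ▸ h)⟩, fun h => h.1⟩)).symm

lemma pvB_eq (includes : List String) (content : String) :
    add_conditional_includes_alt includes content =
      PySem.List.sorted ((pvS4 includes content).filter pvKeep) pvKey := by
  rw [add_conditional_includes_alt, pvS4]
  simp only [List.foldl]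
  obtain ⟨hpw, hperm⟩ := pvFoldB (pvS4 includes content) []
    (by simpa using pvS4_nodup includes content) (by simp)
  rw [pvS4] at hpw hperm
  exact (PySem.List.sorted_eq_of_perm_of_pairwise_lt _ _ _ hperm hpw).symm

-- ===== VERDICT (by name: the statement is the Claim_ definition above) =====
theorem add_conditional_includes_spec : Claim_equal_add_conditional_includes := by
  intro includes content _
  unfold Spec_add_conditional_includes
  rw [pvA_sorted, pvB_eq]
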